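-- pv_equiv track=rewrite | github.com/angelotoledo-gif/python-learning | Week_2/Week2_Lab2.py | detect_common_phrases
-- ===== SOURCE A (Python) =====
-- import string
-- from collections import Counter
--
-- def process_text(text):
--     """
--     Process text into a set of words (lowercase, no punctuation).
--     Args:
--     text: String of text to process
--     Returns:
--     Set of unique words
--     """
--     # TODO: Remove punctuation, convert to lowercase, split into words
--     # Hint: Use string methods and set comprehension
--     translator = str.maketrans('', '', string.punctuation)
--     cleaned_text = text.translate(translator).lower()
--     words = set(cleaned_text.split())
--     return words
--
-- def detect_common_phrases(texts, min_occurrences=3):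
--     """
--     Find words that appear in at least min_occurrences texts.
--     Args:
--     texts: List of text strings
--     min_occurrences: Minimum number of texts word must appear in
--     Returns:
--     Set of common words
--     """
--     # TODO: Find words appearing in multiple texts
--     word_count = Counter()
--     for text in texts:
--         words = process_text(text)
--         for word in words:
--             word_count[word] += 1
--     common_words = {word for word, count in word_count.items() if count >= min_occurrences}
--     return common_words
-- ===== SOURCE B (Python) =====
-- import string
--
-- def process_text(text):
--     translator = str.maketrans('', '', string.punctuation)
--     cleaned_text = text.translate(translator).lower()
--     words = set(cleaned_text.split())
--     return words
--
-- def detect_common_phrases(texts, min_occurrences=3):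
--     # Count by direct membership: no counter dict, just per-word scans of the text sets.
--     word_sets = [process_text(t) for t in texts]
--     all_words = set().union(*word_sets)
--     return {w for w in all_words if sum(w in ws for ws in word_sets) >= min_occurrences}
-- ===== Notes on version B (the rewrite author's own statement) =====
-- stated objective: alternative
-- what changed: Replaces A's incrementally built Counter dict with a counter-free scheme: form the per-text word sets once, take their union, and keep each word iff a direct membership count over the text sets reaches min_occurrences.
import Mathlib
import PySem

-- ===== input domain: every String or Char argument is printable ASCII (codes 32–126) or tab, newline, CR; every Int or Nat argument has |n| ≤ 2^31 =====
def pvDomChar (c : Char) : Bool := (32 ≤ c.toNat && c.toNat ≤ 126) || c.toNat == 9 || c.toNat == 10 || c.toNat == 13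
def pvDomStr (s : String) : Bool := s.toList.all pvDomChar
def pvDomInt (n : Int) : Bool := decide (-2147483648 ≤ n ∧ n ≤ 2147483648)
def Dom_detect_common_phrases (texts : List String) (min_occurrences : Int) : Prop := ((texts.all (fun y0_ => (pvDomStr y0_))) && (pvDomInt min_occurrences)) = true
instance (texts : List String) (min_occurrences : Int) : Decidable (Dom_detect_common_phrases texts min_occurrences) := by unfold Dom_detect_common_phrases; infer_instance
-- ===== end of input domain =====

-- B replaces A's incrementally built word counter with a counter-free membership count
-- over the per-text word sets (alternative algorithm, similar cost).

-- ===== PORT A =====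
-- string.punctuation
def pvPunct : List Char := "!\"#$%&'()*+,-./:;<=>?@[\\]^_`{|}~".toList

-- shared module helper process_text (B's Source B keeps it verbatim):
-- translate(maketrans('','',punctuation)) ported as a character filter (exact on ASCII)
def processText (text : String) : PySem.Set String :=
  PySem.Set.ofList
    (PySem.Str.split₀ (String.mk (PySem.Chars.lower (text.toList.filter (fun c => !pvPunct.contains c)))))

def detect_common_phrases (texts : List String) (min_occurrences : Int) : List String :=
  let word_count : PySem.Dict String Int :=
    texts.foldl (fun d text => (processText text).foldl (fun d w => d.modify w 0 (· + 1)) d)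
      PySem.Dict.empty
  PySem.Set.ofList ((word_count.items.filter (fun p => min_occurrences ≤ p.2)).map (fun p => p.1))

-- ===== PORT B =====
def detect_common_phrases_alt (texts : List String) (min_occurrences : Int) : List String :=
  let wordSets := texts.map processText
  let allWords := wordSets.foldl (fun s ws => PySem.Set.update s ws) PySem.Set.empty
  allWords.filter (fun w => min_occurrences ≤ (wordSets.countP (fun ws => PySem.Set.contains ws w) : Int))

-- ===== PRECONDITION & SPEC =====
def Spec_detect_common_phrases (texts : List String) (min_occurrences : Int) (out : List String) : Prop := out = detect_common_phrases_alt texts min_occurrences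
instance (texts : List String) (min_occurrences : Int) (out : List String) : Decidable (Spec_detect_common_phrases texts min_occurrences out) := by unfold Spec_detect_common_phrases; infer_instance

-- ===== CLAIM (what is proved, stated in full; the proofs are below) =====
def Claim_equal_detect_common_phrases : Prop := ∀ (texts : List String) (min_occurrences : Int), Dom_detect_common_phrases texts min_occurrences → Spec_detect_common_phrases texts min_occurrences (detect_common_phrases texts min_occurrences)

-- ===== LEMMAS AND PROOFS =====

theorem count_flatten_eq_countP (S : List (List String)) (h : ∀ ws ∈ S, ws.Nodup) (w : String) :
    S.flatten.count w = S.countP (fun ws => ws.contains w) := by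
  induction S with
  | nil => simp
  | cons a S ih =>
    have ha : a.Nodup := h a (by simp)
    have hrest := ih (fun ws hws => h ws (List.mem_cons_of_mem _ hws))
    simp only [List.flatten_cons, List.count_append, List.countP_cons, hrest]
    by_cases hw : w ∈ a
    · rw [List.count_eq_one_of_mem ha hw]
      simp [hw]
      omega
    · rw [List.count_eq_zero_of_not_mem hw]
      simp [hw]

theorem A_eq (texts : List String) (m : Int) :
    detect_common_phrases texts m =
      (PySem.Set.ofList (texts.map processText).flatten).filter
        (fun k => decide (m ≤ ((texts.map processText).flatten.count k : Int))) := by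
  unfold detect_common_phrases
  dsimp only
  have hfold : texts.foldl (fun d text => (processText text).foldl (fun d w => d.modify w 0 (· + 1)) d)
      (PySem.Dict.empty : PySem.Dict String Int)
      = PySem.Dict.counter (texts.map processText).flatten := by
    rw [PySem.Dict.counter_eq_foldl, List.foldl_flatten, List.foldl_map]
  rw [hfold, PySem.Dict.items_counter]
  rw [List.filter_map, List.map_map]
  have : ((fun p : String × Int => p.1) ∘ fun k => (k, ((texts.map processText).flatten.count k : Int))) = id := rfl
  rw [this, List.map_id]
  rw [PySem.Set.ofList_eq_self_of_nodup]
  · rfl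
  · exact (PySem.Set.nodup_ofList _).filter _

theorem B_eq (texts : List String) (m : Int) :
    detect_common_phrases_alt texts m =
      (PySem.Set.ofList (texts.map processText).flatten).filter
        (fun w => decide (m ≤ (((texts.map processText).countP (fun ws => PySem.Set.contains ws w)) : Int))) := by
  unfold detect_common_phrases_alt
  dsimp only
  have hall : (texts.map processText).foldl (fun s ws => PySem.Set.update s ws) PySem.Set.empty
      = PySem.Set.ofList (texts.map processText).flatten := by
    rw [PySem.Set.ofList_eq_foldl, List.foldl_flatten]
    rfl
  rw [hall]

-- ===== VERDICT (by name: the statement is the Claim_ definition above) =====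
theorem detect_common_phrases_spec : Claim_equal_detect_common_phrases := by
  intro texts m _
  unfold Spec_detect_common_phrases
  rw [A_eq, B_eq]
  apply List.filter_congr
  intro w _
  have hnodup : ∀ ws ∈ texts.map processText, ws.Nodup := by
    intro ws hws
    obtain ⟨t, _, rfl⟩ := List.mem_map.mp hws
    exact PySem.Set.nodup_ofList _
  rw [count_flatten_eq_countP _ hnodup]
  rfl
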